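-- pv_equiv track=rewrite | github.com/maruvuina/python-labs | lab3/decorate_matrix.py | decorate_matrix_classic_version
-- ===== SOURCE A (Python) =====
-- def decorate_matrix_classic_version(dimension):
--     matrix = [[0] * dimension for _ in range(dimension)]
--     for i in range(dimension):
--         for j in range(dimension):
--             if (i == 0):
--                 matrix[i][j] = 1
--             elif (i == dimension-1):
--                 matrix[i][j] = 1
--             elif (j == 0):
--                 matrix[i][j] = 1
--             elif (j == dimension-1):
--                 matrix[i][j] = 1
--     return matrix
-- ===== SOURCE B (Python) =====
-- def decorate_matrix_classic_version(dimension):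
--     return [[1] * dimension if i == 0 or i == dimension - 1
--             else [1] + [0] * (dimension - 2) + [1]
--             for i in range(dimension)]
-- ===== Notes on version B (the rewrite author's own statement) =====
-- stated objective: simpler
-- what changed: Replaces the mutate-in-place double loop with a four-way branch per cell by a single comprehension that builds each row directly (all-ones border rows, one/zeros/one interior rows), with no per-cell mutation.
import Mathlib
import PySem

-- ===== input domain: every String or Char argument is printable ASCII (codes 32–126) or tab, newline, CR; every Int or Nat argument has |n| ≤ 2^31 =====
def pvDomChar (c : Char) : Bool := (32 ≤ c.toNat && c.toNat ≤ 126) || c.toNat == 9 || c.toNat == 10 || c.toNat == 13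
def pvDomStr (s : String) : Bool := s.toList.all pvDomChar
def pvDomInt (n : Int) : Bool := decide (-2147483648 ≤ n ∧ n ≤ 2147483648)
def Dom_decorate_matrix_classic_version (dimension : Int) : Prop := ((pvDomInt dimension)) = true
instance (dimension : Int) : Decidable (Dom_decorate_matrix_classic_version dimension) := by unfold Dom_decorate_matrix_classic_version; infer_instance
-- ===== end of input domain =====

-- B replaces A's mutate-in-place n×n double loop (4-way branch per cell) by a single
-- comprehension that builds each row directly (objective: simpler).

-- ===== PORT A =====
def decorate_matrix_classic_version (dimension : Int) : List (List Int) :=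
  let matrix := (PySem.List.pyRange 0 dimension 1).map
    (fun _ => PySem.List.pyRepeat [(0 : Int)] dimension)
  (PySem.List.pyRange 0 dimension 1).foldl (fun matrix i =>
    (PySem.List.pyRange 0 dimension 1).foldl (fun matrix j =>
      if i = 0 then
        PySem.List.pySetD matrix i (PySem.List.pySetD (PySem.List.pyGetD matrix i []) j 1)
      else if i = dimension - 1 then
        PySem.List.pySetD matrix i (PySem.List.pySetD (PySem.List.pyGetD matrix i []) j 1)
      else if j = 0 then
        PySem.List.pySetD matrix i (PySem.List.pySetD (PySem.List.pyGetD matrix i []) j 1)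
      else if j = dimension - 1 then
        PySem.List.pySetD matrix i (PySem.List.pySetD (PySem.List.pyGetD matrix i []) j 1)
      else matrix) matrix) matrix

-- ===== PORT B =====
def decorate_matrix_classic_version_alt (dimension : Int) : List (List Int) :=
  (PySem.List.pyRange 0 dimension 1).map (fun i =>
    if i = 0 ∨ i = dimension - 1 then PySem.List.pyRepeat [(1 : Int)] dimension
    else [1] ++ PySem.List.pyRepeat [(0 : Int)] (dimension - 2) ++ [1])

-- ===== PRECONDITION & SPEC =====
def Spec_decorate_matrix_classic_version (dimension : Int) (out : List (List Int)) : Prop := out = decorate_matrix_classic_version_alt dimension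
instance (dimension : Int) (out : List (List Int)) : Decidable (Spec_decorate_matrix_classic_version dimension out) := by unfold Spec_decorate_matrix_classic_version; infer_instance

-- ===== CLAIM (what is proved, stated in full; the proofs are below) =====
def Claim_equal_decorate_matrix_classic_version : Prop := ∀ (dimension : Int), Dom_decorate_matrix_classic_version dimension → Spec_decorate_matrix_classic_version dimension (decorate_matrix_classic_version dimension)

-- ===== LEMMAS AND PROOFS =====

-- One inner-loop pass of A for a fixed row index i factors into a single set of row i.
theorem pv_inner_factor (c : Int → Prop) [DecidablePred c] (i : Int) (hi : 0 ≤ i)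
    (js : List Int) : ∀ (m : List (List Int)), i.toNat < m.length →
    js.foldl (fun m j => if c j then
        PySem.List.pySetD m i (PySem.List.pySetD (PySem.List.pyGetD m i []) j 1) else m) m
    = m.set i.toNat
        (js.foldl (fun r j => if c j then PySem.List.pySetD r j 1 else r) (m.getD i.toNat [])) := by
  induction js with
  | nil =>
    intro m hm
    simp [List.getD, List.getElem?_eq_getElem hm, List.set_getElem_self]
  | cons j js ih =>
    intro m hm
    simp only [List.foldl_cons]
    by_cases hc : c j
    · simp only [hc, if_pos]
      rw [show PySem.List.pySetD m i (PySem.List.pySetD (PySem.List.pyGetD m i []) j 1)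
            = m.set i.toNat (PySem.List.pySetD (m.getD i.toNat []) j 1) by
          rw [PySem.List.pySetD_of_nonneg _ _ hi, PySem.List.pyGetD_of_nonneg _ _ hi]]
      rw [ih _ (by simpa using hm)]
      rw [List.set_set]
      congr 1
      simp [List.getD, hm]
    · simp only [hc, if_neg, not_false_iff]
      exact ih m hm

-- Generic outer loop over distinct row indices: length and row k of the result.
theorem pv_outer_get (n : Nat) (R : Int → List Int → List Int)
    (F : List (List Int) → Int → List (List Int))
    (is : List Int) :
    ∀ (m : List (List Int)), m.length = n → is.Nodup →
    (∀ m' i, i ∈ is → m'.length = n → (F m' i).length = n) →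
    (∀ m' i, i ∈ is → m'.length = n → ∀ k : Nat, k < n →
        (F m' i).getD k [] = if (k : Int) = i then R i (m'.getD k []) else m'.getD k []) →
    (is.foldl F m).length = n ∧
    (∀ k : Nat, k < n →
      (is.foldl F m).getD k [] = if (k : Int) ∈ is then R (k : Int) (m.getD k []) else m.getD k []) := by
  induction is with
  | nil => intro m hm _ _ _; simpa using hm
  | cons i is ih =>
    intro m hm hnd hlen hget
    have hnd' := (List.nodup_cons.mp hnd).2
    have hi_not : i ∉ is := (List.nodup_cons.mp hnd).1
    have him : i ∈ i :: is := List.mem_cons_self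
    have hm' : (F m i).length = n := hlen m i him hm
    have ihsp := ih (F m i) hm' hnd'
      (fun m' j hj h => hlen m' j (List.mem_cons_of_mem _ hj) h)
      (fun m' j hj h => hget m' j (List.mem_cons_of_mem _ hj) h)
    refine ⟨by simpa using ihsp.1, ?_⟩
    intro k hk
    simp only [List.foldl_cons, List.mem_cons]
    rw [ihsp.2 k hk]
    have hFm := hget m i him hm k hk
    by_cases hki : (k : Int) = i
    · have h1 : (k : Int) ∉ is := by rw [hki]; exact hi_not
      rw [if_neg h1, hFm, if_pos hki, if_pos (Or.inl hki), hki]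
    · by_cases hkis : (k : Int) ∈ is
      · rw [if_pos hkis, hFm, if_neg hki, if_pos (Or.inr hkis)]
      · rw [if_neg hkis, hFm, if_neg hki, if_neg (by tauto)]

-- One row pass: entry p of the fold that sets positions satisfying c to 1.
theorem pv_row_get (c : Int → Prop) [DecidablePred c] (js : List Int) :
    ∀ (r : List Int), js.Nodup → (∀ j ∈ js, 0 ≤ j) →
    (js.foldl (fun r j => if c j then PySem.List.pySetD r j 1 else r) r).length = r.length ∧
    (∀ p : Nat, p < r.length →
      (js.foldl (fun r j => if c j then PySem.List.pySetD r j 1 else r) r).getD p 0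
      = if (p : Int) ∈ js ∧ c (p : Int) then 1 else r.getD p 0) := by
  induction js with
  | nil => intro r _ _; simp
  | cons j js ih =>
    intro r hnd hnn
    have hnd' := (List.nodup_cons.mp hnd).2
    have hj_not : j ∉ js := (List.nodup_cons.mp hnd).1
    have hj0 : 0 ≤ j := hnn j List.mem_cons_self
    have hnn' : ∀ j' ∈ js, 0 ≤ j' := fun j' h => hnn j' (List.mem_cons_of_mem _ h)
    by_cases hc : c j
    · have hstep : ∀ r : List Int,
        (fun r j => if c j then PySem.List.pySetD r j 1 else r) r j = r.set j.toNat 1 := by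
        intro r; simp only [hc, if_pos]; exact PySem.List.pySetD_of_nonneg _ _ hj0
      have ihsp := ih (r.set j.toNat 1) hnd' hnn'
      constructor
      · simp only [List.foldl_cons, hstep]
        rw [ihsp.1]; simp
      · intro p hp
        simp only [List.foldl_cons, hstep]
        rw [ihsp.2 p (by simpa using hp)]
        by_cases hpj : (p : Int) = j
        · have h1 : (p : Int) ∉ js := by rw [hpj]; exact hj_not
          have hpt : j.toNat = p := by omega
          rw [if_neg (by tauto), if_pos ⟨List.mem_cons.mpr (Or.inl hpj), hpj ▸ hc⟩, hpt]
          simp [List.getD, hp]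
        · have hne : j.toNat ≠ p := by omega
          have hset : (r.set j.toNat 1).getD p 0 = r.getD p 0 := by
            simp [List.getD, List.getElem?_set_ne hne]
          rw [hset]
          by_cases hmem : (p : Int) ∈ js ∧ c (p : Int)
          · rw [if_pos hmem, if_pos ⟨List.mem_cons.mpr (Or.inr hmem.1), hmem.2⟩]
          · rw [if_neg hmem, if_neg (by rw [List.mem_cons]; tauto)]
    · have hstep : (fun r j => if c j then PySem.List.pySetD r j 1 else r) r j = r := by
        simp [hc]
      have ihsp := ih r hnd' hnn'
      constructor
      · simp only [List.foldl_cons, hstep]; exact ihsp.1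
      · intro p hp
        simp only [List.foldl_cons, hstep]
        rw [ihsp.2 p hp]
        by_cases hpj : (p : Int) = j
        · rw [if_neg (by rw [hpj]; tauto), if_neg (by rw [List.mem_cons, hpj]; tauto)]
        · by_cases hmem : (p : Int) ∈ js ∧ c (p : Int)
          · rw [if_pos hmem, if_pos ⟨List.mem_cons.mpr (Or.inr hmem.1), hmem.2⟩]
          · rw [if_neg hmem, if_neg (by rw [List.mem_cons]; tauto)]

-- Entry p of B's interior row [1] ++ [0]*m ++ [1].
theorem pv_interior_get (m p : Nat) (hp : p < m + 2) :
    ((1 :: (List.replicate m (0 : Int) ++ [1]))).getD p 0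
    = if p = 0 ∨ p = m + 1 then 1 else 0 := by
  match p with
  | 0 => simp
  | q + 1 =>
    simp only [List.getD, List.getElem?_cons_succ]
    by_cases hq : q < m
    · rw [List.getElem?_append_left (by simpa using hq)]
      simp [hq]
      omega
    · have hqe : q = m := by omega
      subst hqe
      rw [List.getElem?_append_right (by simp)]
      simp

theorem pv_main (d : Int) :
    decorate_matrix_classic_version d = decorate_matrix_classic_version_alt d := by
  unfold decorate_matrix_classic_version decorate_matrix_classic_version_alt
  by_cases hd0 : d ≤ 0
  · rw [PySem.List.pyRange_one_eq_nil hd0]; rfl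
  · push Not at hd0
    -- collapse A's nested branches into one 4-way disjunction
    have hbody : ∀ (m : List (List Int)) (i j : Int),
        (if i = 0 then
          PySem.List.pySetD m i (PySem.List.pySetD (PySem.List.pyGetD m i []) j 1)
        else if i = d - 1 then
          PySem.List.pySetD m i (PySem.List.pySetD (PySem.List.pyGetD m i []) j 1)
        else if j = 0 then
          PySem.List.pySetD m i (PySem.List.pySetD (PySem.List.pyGetD m i []) j 1)
        else if j = d - 1 then
          PySem.List.pySetD m i (PySem.List.pySetD (PySem.List.pyGetD m i []) j 1)
        else m)
        = if i = 0 ∨ i = d - 1 ∨ j = 0 ∨ j = d - 1 then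
            PySem.List.pySetD m i (PySem.List.pySetD (PySem.List.pyGetD m i []) j 1)
          else m := by
      intro m i j; split_ifs <;> tauto
    simp only [hbody]
    -- the initial all-zeros matrix
    have hinit_len : ((PySem.List.pyRange 0 d 1).map
        (fun _ => PySem.List.pyRepeat [(0:Int)] d)).length = d.toNat := by
      simp [PySem.List.length_pyRange_one]
    have hinit_get : ∀ k : Nat, k < d.toNat →
        ((PySem.List.pyRange 0 d 1).map
          (fun _ => PySem.List.pyRepeat [(0:Int)] d)).getD k [] = List.replicate d.toNat 0 := by
      intro k hk
      rw [List.getD_eq_getElem _ _ (by simpa [hinit_len] using hk), List.getElem_map,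
        PySem.List.pyRepeat_singleton]
    -- outer loop via pv_outer_get
    obtain ⟨hAlen, hAget⟩ := pv_outer_get d.toNat
      (fun i r => (PySem.List.pyRange 0 d 1).foldl
        (fun r j => if i = 0 ∨ i = d - 1 ∨ j = 0 ∨ j = d - 1 then PySem.List.pySetD r j 1 else r) r)
      (fun m i => (PySem.List.pyRange 0 d 1).foldl
        (fun m j => if i = 0 ∨ i = d - 1 ∨ j = 0 ∨ j = d - 1 then
          PySem.List.pySetD m i (PySem.List.pySetD (PySem.List.pyGetD m i []) j 1) else m) m)
      (PySem.List.pyRange 0 d 1)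
      ((PySem.List.pyRange 0 d 1).map (fun _ => PySem.List.pyRepeat [(0:Int)] d))
      hinit_len (PySem.List.nodup_pyRange_one 0 d)
      (by
        intro m' i hi hm'
        have hib : 0 ≤ i ∧ i < d := PySem.List.mem_pyRange_one.mp hi
        beta_reduce
        rw [pv_inner_factor _ i hib.1 _ m' (by omega)]
        simpa using hm')
      (by
        intro m' i hi hm' k hk
        have hib : 0 ≤ i ∧ i < d := PySem.List.mem_pyRange_one.mp hi
        beta_reduce
        rw [pv_inner_factor _ i hib.1 _ m' (by omega)]
        by_cases hki : (k : Int) = i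
        · have h1 : i.toNat = k := by omega
          rw [if_pos hki, ← hki]
          simp [List.getD, hm', hk]
        · have h1 : i.toNat ≠ k := by omega
          rw [if_neg hki]
          simp [List.getD, List.getElem?_set_ne h1])
    -- now prove equality row by row
    apply List.ext_getElem
    · rw [hAlen]; simp [PySem.List.length_pyRange_one]
    · intro k hk1 hk2
      have hkn : k < d.toNat := by rwa [hAlen] at hk1
      rw [← List.getD_eq_getElem _ [] hk1, ← List.getD_eq_getElem _ [] hk2]
      have hkmem : (k : Int) ∈ PySem.List.pyRange 0 d 1 :=
        PySem.List.mem_pyRange_one.mpr (by omega)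
      rw [hAget k hkn, if_pos hkmem, hinit_get k hkn]
      -- row fold characterization
      obtain ⟨hrlen, hrget⟩ := pv_row_get
        (fun j => (k : Int) = 0 ∨ (k : Int) = d - 1 ∨ j = 0 ∨ j = d - 1)
        (PySem.List.pyRange 0 d 1) (List.replicate d.toNat 0)
        (PySem.List.nodup_pyRange_one 0 d)
        (fun j hj => (PySem.List.mem_pyRange_one.mp hj).1)
      -- B's row k
      have hBk : ((PySem.List.pyRange 0 d 1).map (fun i =>
          if i = 0 ∨ i = d - 1 then PySem.List.pyRepeat [(1:Int)] d
          else [1] ++ PySem.List.pyRepeat [(0:Int)] (d - 2) ++ [1])).getD k []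
          = if (k : Int) = 0 ∨ (k : Int) = d - 1 then List.replicate d.toNat 1
            else [1] ++ List.replicate (d-2).toNat 0 ++ [1] := by
        rw [List.getD_eq_getElem _ _ (by simpa [PySem.List.length_pyRange_one] using hkn),
          List.getElem_map, PySem.List.getElem_pyRange_one, PySem.List.pyRepeat_singleton,
          PySem.List.pyRepeat_singleton]
        norm_num
      rw [hBk]
      apply List.ext_getElem
      · rw [hrlen, List.length_replicate]
        split_ifs with hb
        · simp
        · have hk0 : (k : Int) ≠ 0 := fun h => hb (Or.inl h)
          have hkd : (k : Int) ≠ d - 1 := fun h => hb (Or.inr h)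
          simp only [List.length_append, List.length_replicate, List.length_cons,
            List.length_nil]
          omega
      · intro p hp1 hp2
        have hpn : p < d.toNat := by rwa [hrlen, List.length_replicate] at hp1
        rw [← List.getD_eq_getElem _ 0 hp1, ← List.getD_eq_getElem _ 0 hp2]
        have hpmem : (p : Int) ∈ PySem.List.pyRange 0 d 1 :=
          PySem.List.mem_pyRange_one.mpr (by omega)
        rw [hrget p (by simpa using hpn)]
        by_cases hkb : (k : Int) = 0 ∨ (k : Int) = d - 1
        · rw [if_pos ⟨hpmem, by tauto⟩, if_pos hkb,
            List.getD_eq_getElem _ _ (by simpa using hpn)]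
          simp
        · rw [if_neg hkb,
            show ([1] ++ List.replicate (d-2).toNat (0:Int) ++ [1])
              = 1 :: (List.replicate (d-2).toNat 0 ++ [1]) by simp,
            pv_interior_get _ p (by omega)]
          push Not at hkb
          by_cases hpb : p = 0 ∨ p = (d-2).toNat + 1
          · rw [if_pos ⟨hpmem, by omega⟩, if_pos hpb]
          · rw [if_neg hpb, if_neg (by rintro ⟨-, hc⟩; omega),
              List.getD_eq_getElem _ _ (by simpa using hpn)]
            simp

-- ===== VERDICT (by name: the statement is the Claim_ definition above) =====
theorem decorate_matrix_classic_version_spec : Claim_equal_decorate_matrix_classic_version := by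
  intro d _
  unfold Spec_decorate_matrix_classic_version
  exact pv_main d
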